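-- pv_equiv track=rewrite | github.com/cisagov/pca-report-library | src/pca_report_library/customer/closing.py | appearance_above_ave
-- ===== SOURCE A (Python) =====
-- def text_list_separator(index, length, text, punctuation_type="comma"):
--     """Add the comma or the or based on length of list.
--
--     :param text:
--     :return text:
--     """
--     if (index + 1) < length:
--         if (index + 1) < length - 1:
--             if punctuation_type == "comma":
--                 text = f"{text},"
--             elif punctuation_type == "semicolon":
--                 text = f"{text};"
--         else:
--             if punctuation_type == "comma":
--                 text = f"{text}, or"
--             elif punctuation_type == "semicolon":
--                 text = f"{text}; and"
--
--     return text
--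
-- def appearance_above_ave(appearance):
--     """Build out the appearance indicators that are above the click rate and returns as a text string.
--
--     :param appearance:
--     :return appearance_text:
--     """
--     appearance_text = "for the appearance category, emails with"
--     for index, indicator in enumerate(appearance):
--         if indicator == "link_domain - Spoofed":
--             appearance_text = (
--                 f"{appearance_text} hyperlinked text rather than bare URLs"
--             )
--         elif indicator == "link_domain - Fake":
--             appearance_text = (
--                 f"{appearance_text} written out URLs rather than hyperlinked text"
--             )
--         elif indicator == "logo_graphics - True":
--             appearance_text = f"{appearance_text} HTML formatting or graphics"
--         elif indicator == "grammar - Proper":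
--             appearance_text = (
--                 f"{appearance_text} proper grammar and professional formatting"
--             )
--         elif indicator == "grammar - Decent":
--             appearance_text = f"{appearance_text} decent grammar"
--         elif indicator == "grammar - Poor":
--             appearance_text = f"{appearance_text} poor grammar"
--
--         appearance_text = text_list_separator(index, len(appearance), appearance_text)
--
--     return appearance_text
-- ===== SOURCE B (Python) =====
-- _FRAGMENTS = {
--     "link_domain - Spoofed": " hyperlinked text rather than bare URLs",
--     "link_domain - Fake": " written out URLs rather than hyperlinked text",
--     "logo_graphics - True": " HTML formatting or graphics",
--     "grammar - Proper": " proper grammar and professional formatting",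
--     "grammar - Decent": " decent grammar",
--     "grammar - Poor": " poor grammar",
-- }
--
--
-- def appearance_above_ave(appearance):
--     """Build the above-average appearance text via a fragment table and a join."""
--     prefix = "for the appearance category, emails with"
--     pieces = [_FRAGMENTS.get(indicator, "") for indicator in appearance]
--     if not pieces:
--         return prefix
--     if len(pieces) == 1:
--         return prefix + pieces[0]
--     return prefix + ",".join(pieces[:-1]) + ", or" + pieces[-1]
-- ===== Notes on version B (the rewrite author's own statement) =====
-- stated objective: simpler
-- what changed: Replaced the six-way if/elif chain plus per-index separator helper with a module-level fragment dict mapped over the input, then a single join-based assembly (','.join of all but the last piece, ', or', last piece) instead of rebuilding the accumulator string at every index.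
import Mathlib
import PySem

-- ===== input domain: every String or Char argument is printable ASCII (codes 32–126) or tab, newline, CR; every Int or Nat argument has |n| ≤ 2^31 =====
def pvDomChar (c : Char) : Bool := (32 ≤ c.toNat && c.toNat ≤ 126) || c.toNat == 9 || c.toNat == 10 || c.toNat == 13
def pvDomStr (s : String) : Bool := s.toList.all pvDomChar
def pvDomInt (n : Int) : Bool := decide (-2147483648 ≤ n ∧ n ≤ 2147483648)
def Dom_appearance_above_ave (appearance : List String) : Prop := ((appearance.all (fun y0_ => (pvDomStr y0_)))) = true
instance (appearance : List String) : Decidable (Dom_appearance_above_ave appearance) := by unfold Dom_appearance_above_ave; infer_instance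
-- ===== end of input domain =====

-- B replaces A's six-way if/elif chain plus per-index separator helper with a fragment dict mapped over the input and a join-based assembly (simpler decomposition, same cost).

-- ===== PORT A =====
def text_list_separator (index length : Int) (text : String) (punctuation_type : String) : String :=
  if index + 1 < length then
    if index + 1 < length - 1 then
      if punctuation_type == "comma" then text ++ ","
      else if punctuation_type == "semicolon" then text ++ ";"
      else text
    else
      if punctuation_type == "comma" then text ++ ", or"
      else if punctuation_type == "semicolon" then text ++ "; and"
      else text
  else text

def appearance_above_ave (appearance : List String) : String :=
  (PySem.List.enumerate appearance 0).foldl (fun appearance_text iv =>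
    let t :=
      if iv.2 == "link_domain - Spoofed" then
        appearance_text ++ " hyperlinked text rather than bare URLs"
      else if iv.2 == "link_domain - Fake" then
        appearance_text ++ " written out URLs rather than hyperlinked text"
      else if iv.2 == "logo_graphics - True" then
        appearance_text ++ " HTML formatting or graphics"
      else if iv.2 == "grammar - Proper" then
        appearance_text ++ " proper grammar and professional formatting"
      else if iv.2 == "grammar - Decent" then
        appearance_text ++ " decent grammar"
      else if iv.2 == "grammar - Poor" then
        appearance_text ++ " poor grammar"
      else appearance_text
    text_list_separator iv.1 (appearance.length : Int) t "comma")
    "for the appearance category, emails with"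

-- ===== PORT B =====
def pvFragments : PySem.Dict String String :=
  PySem.Dict.ofList
    [ ("link_domain - Spoofed", " hyperlinked text rather than bare URLs"),
      ("link_domain - Fake", " written out URLs rather than hyperlinked text"),
      ("logo_graphics - True", " HTML formatting or graphics"),
      ("grammar - Proper", " proper grammar and professional formatting"),
      ("grammar - Decent", " decent grammar"),
      ("grammar - Poor", " poor grammar") ]

def appearance_above_ave_alt (appearance : List String) : String :=
  let pre := "for the appearance category, emails with"
  let pieces := appearance.map (fun indicator => pvFragments.getD indicator "")
  if pieces = [] then pre
  else if pieces.length = 1 then pre ++ PySem.List.pyGetD pieces 0 ""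
  else pre ++ PySem.Str.join "," (PySem.List.slice pieces none (some (-1)))
         ++ ", or" ++ PySem.List.pyGetD pieces (-1) ""

-- ===== PRECONDITION & SPEC =====
def Spec_appearance_above_ave (appearance : List String) (out : String) : Prop := out = appearance_above_ave_alt appearance
instance (appearance : List String) (out : String) : Decidable (Spec_appearance_above_ave appearance out) := by unfold Spec_appearance_above_ave; infer_instance

-- ===== CLAIM (what is proved, stated in full; the proofs are below) =====
def Claim_equal_appearance_above_ave : Prop := ∀ (appearance : List String), Dom_appearance_above_ave appearance → Spec_appearance_above_ave appearance (appearance_above_ave appearance)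

-- ===== LEMMAS AND PROOFS =====

/-- the fragment of one indicator, as B looks it up -/
def pvFrag (x : String) : String := pvFragments.getD x ""

/-- the body text both programs build after the prefix: one piece per element,
    "," between pieces except ", or" before the last one -/
def pvCore : List String → String
  | [] => ""
  | [p] => p
  | p :: q :: ps => p ++ (if (q :: ps).length = 1 then ", or" else ",") ++ pvCore (q :: ps)

/-- A's if/elif fragment chain appends exactly the fragment B's dict lookup yields -/
theorem pvFrag_step (t x : String) :
    (if x == "link_domain - Spoofed" then t ++ " hyperlinked text rather than bare URLs"
     else if x == "link_domain - Fake" then t ++ " written out URLs rather than hyperlinked text"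
     else if x == "logo_graphics - True" then t ++ " HTML formatting or graphics"
     else if x == "grammar - Proper" then t ++ " proper grammar and professional formatting"
     else if x == "grammar - Decent" then t ++ " decent grammar"
     else if x == "grammar - Poor" then t ++ " poor grammar"
     else t) = t ++ pvFrag x := by
  have h : pvFrag x = (PySem.Dict.mk
    [ ("link_domain - Spoofed", " hyperlinked text rather than bare URLs"),
      ("link_domain - Fake", " written out URLs rather than hyperlinked text"),
      ("logo_graphics - True", " HTML formatting or graphics"),
      ("grammar - Proper", " proper grammar and professional formatting"),
      ("grammar - Decent", " decent grammar"),
      ("grammar - Poor", " poor grammar") ]).getD x "" := rfl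
  rw [h]
  simp only [PySem.Dict.getD, PySem.Dict.get?_mk_cons, beq_iff_eq]
  by_cases h1 : x = "link_domain - Spoofed"
  · subst h1; rfl
  · rw [if_neg h1, if_neg (show ¬("link_domain - Spoofed" = x) from fun hh => h1 hh.symm)]
    by_cases h2 : x = "link_domain - Fake"
    · subst h2; rfl
    · rw [if_neg h2, if_neg (show ¬("link_domain - Fake" = x) from fun hh => h2 hh.symm)]
      by_cases h3 : x = "logo_graphics - True"
      · subst h3; rfl
      · rw [if_neg h3, if_neg (show ¬("logo_graphics - True" = x) from fun hh => h3 hh.symm)]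
        by_cases h4 : x = "grammar - Proper"
        · subst h4; rfl
        · rw [if_neg h4, if_neg (show ¬("grammar - Proper" = x) from fun hh => h4 hh.symm)]
          by_cases h5 : x = "grammar - Decent"
          · subst h5; rfl
          · rw [if_neg h5, if_neg (show ¬("grammar - Decent" = x) from fun hh => h5 hh.symm)]
            by_cases h6 : x = "grammar - Poor"
            · subst h6; rfl
            · rw [if_neg h6, if_neg (show ¬("grammar - Poor" = x) from fun hh => h6 hh.symm)]
              simp [PySem.Dict.get?]

/-- A's separator-per-index loop, from position k of a list of total length n, builds pvCore -/
theorem foldl_sep_core (xs : List String) (k n : Int) (s : String)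
    (hn : n = k + (xs.length : Int)) :
    (PySem.List.enumerate xs k).foldl
      (fun text iv => text_list_separator iv.1 n (text ++ pvFrag iv.2) "comma") s
    = s ++ pvCore (xs.map pvFrag) := by
  induction xs generalizing k s with
  | nil =>
    apply String.toList_injective
    simp [PySem.List.enumerate_nil, pvCore]
  | cons x rest ih =>
    rw [PySem.List.enumerate_cons, List.foldl_cons]
    have hn' : n = (k + 1) + (rest.length : Int) := by
      simp only [List.length_cons] at hn; push_cast at hn ⊢; omega
    rw [ih (k + 1) (text_list_separator k n (s ++ pvFrag x) "comma") hn']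
    rcases rest with _ | ⟨y, ys⟩
    · -- x is the last element: index k, n = k + 1, the separator helper appends nothing
      have hk : ¬ (k + 1 < n) := by simp only [List.length_nil] at hn'; omega
      apply String.toList_injective
      simp [text_list_separator, pvCore, hk]
    · rcases ys with _ | ⟨z, zs⟩
      · -- exactly one element follows: the helper appends ", or"
        have h1 : k + 1 < n := by simp only [List.length_cons, List.length_nil] at hn'; omega
        have h2 : ¬ (k + 1 < n - 1) := by simp only [List.length_cons, List.length_nil] at hn'; omega
        apply String.toList_injective
        simp [text_list_separator, pvCore, h1, h2]
      · -- at least two elements follow: the helper appends ","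
        have hlen : n = k + 1 + 1 + ((zs.length : Int) + 1) := by
          simp only [List.length_cons] at hn'; push_cast at hn' ⊢; omega
        have h1 : k + 1 < n := by omega
        have h2 : k + 1 < n - 1 := by omega
        apply String.toList_injective
        simp [text_list_separator, pvCore, h1, h2]

/-- Str.join over a two-or-more list, split at the head -/
theorem join_cons_cons (p q : String) (r : List String) :
    PySem.Str.join "," (p :: q :: r) = p ++ "," ++ PySem.Str.join "," (q :: r) := by
  apply String.toList_injective
  simp [PySem.Str.join, PySem.Chars.join_cons_cons]

/-- B's join-based assembly of a two-or-more piece list builds pvCore -/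
theorem join_core (p q : String) (ps : List String) :
    PySem.Str.join "," ((p :: q :: ps).dropLast) ++ ", or"
      ++ (p :: q :: ps).getLast (by simp)
    = pvCore (p :: q :: ps) := by
  induction ps generalizing p q with
  | nil =>
    apply String.toList_injective
    simp [pvCore, PySem.Str.join, PySem.Chars.join, List.intercalate]
  | cons z zs ih =>
    have hd : (p :: q :: z :: zs).dropLast = p :: q :: (z :: zs).dropLast := by simp
    have hl : (p :: q :: z :: zs).getLast (by simp) = (q :: z :: zs).getLast (by simp) := by
      simp [List.getLast_cons]
    have hd' : (q :: z :: zs).dropLast = q :: (z :: zs).dropLast := by simp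
    rw [hd, join_cons_cons, hl]
    have := ih q z
    rw [hd'] at this
    apply String.toList_injective
    have hcore : pvCore (p :: q :: z :: zs) = p ++ "," ++ pvCore (q :: z :: zs) := by
      simp [pvCore]
    rw [hcore, ← this]
    simp

/-- B's branches, rewritten through pvCore -/
theorem alt_eq_core (appearance : List String) :
    appearance_above_ave_alt appearance
      = "for the appearance category, emails with" ++ pvCore (appearance.map pvFrag) := by
  unfold appearance_above_ave_alt
  have hmap : appearance.map (fun indicator => pvFragments.getD indicator "")
      = appearance.map pvFrag := by simp [pvFrag]
  rw [hmap]
  rcases happ : appearance.map pvFrag with _ | ⟨p, ps⟩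
  · apply String.toList_injective
    simp [pvCore]
  · rcases ps with _ | ⟨q, qs⟩
    · simp [pvCore, PySem.List.pyGetD_zero_cons]
    · have hne : (p :: q :: qs) ≠ ([] : List String) := by simp
      have hlast : PySem.List.pyGetD (p :: q :: qs) (-1) "" = (p :: q :: qs).getLast (by simp) :=
        PySem.List.pyGetD_neg_one _ _ hne
      have hslice : PySem.List.slice (p :: q :: qs) none (some (-1)) = (p :: q :: qs).dropLast :=
        PySem.List.slice_to_neg_one _
      simp only [hne, if_false, List.length_cons, hslice, hlast]
      have hlen : ¬ (qs.length + 1 + 1 = 1) := by omega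
      rw [if_neg hlen]
      apply String.toList_injective
      rw [← join_core p q qs]
      simp

-- ===== VERDICT (by name: the statement is the Claim_ definition above) =====
theorem appearance_above_ave_spec : Claim_equal_appearance_above_ave := by
  intro appearance _
  unfold Spec_appearance_above_ave
  rw [alt_eq_core]
  unfold appearance_above_ave
  simp only [pvFrag_step]
  rw [foldl_sep_core appearance 0 (appearance.length : Int)
    "for the appearance category, emails with" (by omega)]
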